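-- pv_equiv track=rewrite | github.com/KurlenMurlen/pdf-analyzer-rag | src/utils.py | extract_sections
-- ===== SOURCE A (Python) =====
-- def extract_sections(text: str, section_titles: list) -> dict:
--     """Extracts specified sections from the text based on section titles."""
--     sections = {}
--     for title in section_titles:
--         start_index = text.find(title)
--         if start_index != -1:
--             end_index = text.find('\n', start_index)
--             sections[title] = text[start_index:end_index].strip()
--     return sections
-- ===== SOURCE B (Python) =====
-- def extract_sections(text: str, section_titles: list) -> dict:
--     """Extracts specified sections from the text based on section titles."""
--     # one left-to-right sweep over match positions locates the first
--     # occurrence of every title simultaneously (multi-pattern scan)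
--     first = {}
--     wanted = set(section_titles)
--     for i in range(len(text) + 1):
--         if len(first) == len(wanted):
--             break
--         for title in section_titles:
--             if title not in first and text.startswith(title, i):
--                 first[title] = i
--     sections = {}
--     for title in section_titles:
--         if title in first:
--             start = first[title]
--             end = text.find('\n', start)
--             sections[title] = text[start:end].strip()
--     return sections
-- ===== Notes on version B (the rewrite author's own statement) =====
-- stated objective: alternative
-- what changed: B locates the first occurrence of all titles simultaneously in one position-major sweep over the text (testing every still-unfound title at each position and stopping once all are found) instead of running a separate text.find(title) search per title, and only then cuts each section at the following newline.
import Mathlib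
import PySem

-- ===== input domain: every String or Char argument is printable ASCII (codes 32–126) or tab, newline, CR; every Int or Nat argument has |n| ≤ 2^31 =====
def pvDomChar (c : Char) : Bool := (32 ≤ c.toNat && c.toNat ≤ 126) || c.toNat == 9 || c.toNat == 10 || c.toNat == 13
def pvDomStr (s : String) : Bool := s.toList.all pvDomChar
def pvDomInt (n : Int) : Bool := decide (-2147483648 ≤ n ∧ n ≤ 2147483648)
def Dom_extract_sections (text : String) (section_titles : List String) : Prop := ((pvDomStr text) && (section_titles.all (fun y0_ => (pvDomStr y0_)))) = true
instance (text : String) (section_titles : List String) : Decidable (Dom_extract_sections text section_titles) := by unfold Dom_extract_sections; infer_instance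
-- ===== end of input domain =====

-- B finds the first occurrence of all titles in one position-major sweep over the text instead of a
-- separate text.find(title) search per title (objective: alternative; same return value everywhere).

-- ===== PORT A =====
def extract_sections (text : String) (section_titles : List String) : List (String × String) :=
  (section_titles.foldl (fun sections title =>
    let start_index := PySem.Str.find text title
    if start_index ≠ -1 then
      let end_index := PySem.Str.findFrom text "\n" start_index
      PySem.Dict.insert sections title
        (PySem.Str.strip (PySem.Str.slice text (some start_index) (some end_index)))
    else sections) (PySem.Dict.mk [])).items

-- ===== PORT B =====
-- text.startswith(title, i): exact for 0 ≤ i (B only calls it with i from range(len+1))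
def pvStartswithFrom (s sub : List Char) (i : Int) : Bool :=
  sub.isPrefixOf (s.drop i.toNat)

def extract_sections_alt (text : String) (section_titles : List String) : List (String × String) :=
  let wanted := PySem.Set.ofList section_titles
  let first := (PySem.List.pyRange 0 (PySem.Str.len text + 1) 1).foldl (fun d i =>
    if d.size = wanted.length then d
    else section_titles.foldl (fun d title =>
      if !d.contains title && pvStartswithFrom text.toList title.toList i then
        d.insert title i
      else d) d) (PySem.Dict.mk [])
  (section_titles.foldl (fun sections title =>
    match first.get? title with
    | some start =>
      let e := PySem.Str.findFrom text "\n" start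
      PySem.Dict.insert sections title
        (PySem.Str.strip (PySem.Str.slice text (some start) (some e)))
    | none => sections) (PySem.Dict.mk [])).items

-- ===== PRECONDITION & SPEC =====
def Spec_extract_sections (text : String) (section_titles : List String) (out : List (String × String)) : Prop := out = extract_sections_alt text section_titles
instance (text : String) (section_titles : List String) (out : List (String × String)) : Decidable (Spec_extract_sections text section_titles out) := by unfold Spec_extract_sections; infer_instance

-- ===== CLAIM (what is proved, stated in full; the proofs are below) =====
def Claim_equal_extract_sections : Prop := ∀ (text : String) (section_titles : List String), Dom_extract_sections text section_titles → Spec_extract_sections text section_titles (extract_sections text section_titles)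

-- ===== LEMMAS AND PROOFS =====

-- the first element of l satisfying p (what B's sweep records per title)
def pvFirstHit (p : Int → Bool) (l : List Int) : Option Int :=
  match l with
  | [] => none
  | i :: r => if p i then some i else pvFirstHit p r

-- "r is the first element of l satisfying p, as an Option"
def pvIsFirstHit (p : Int → Bool) (l : List Int) (r : Option Int) : Prop :=
  (r = none ∧ ∀ i ∈ l, p i = false) ∨
  (∃ i, r = some i ∧ i ∈ l ∧ p i = true ∧ ∀ j ∈ l, j < i → p j = false)

lemma pv_isFirstHit_unique (p : Int → Bool) (l : List Int)
    (r₁ r₂ : Option Int) (h₁ : pvIsFirstHit p l r₁) (h₂ : pvIsFirstHit p l r₂) : r₁ = r₂ := by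
  rcases h₁ with ⟨rfl, hn₁⟩ | ⟨i₁, rfl, hm₁, hp₁, hmin₁⟩ <;>
    rcases h₂ with ⟨rfl, hn₂⟩ | ⟨i₂, rfl, hm₂, hp₂, hmin₂⟩
  · rfl
  · rw [hn₁ i₂ hm₂] at hp₂; cases hp₂
  · rw [hn₂ i₁ hm₁] at hp₁; cases hp₁
  · rcases lt_trichotomy i₁ i₂ with h | h | h
    · rw [hmin₂ i₁ hm₁ h] at hp₁; cases hp₁
    · rw [h]
    · rw [hmin₁ i₂ hm₂ h] at hp₂; cases hp₂

lemma pv_firstHit_isFirstHit (p : Int → Bool) (l : List Int) (hl : l.Pairwise (· < ·)) :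
    pvIsFirstHit p l (pvFirstHit p l) := by
  induction l with
  | nil => exact Or.inl ⟨rfl, by simp⟩
  | cons i r ih =>
    by_cases hp : p i = true
    · right
      refine ⟨i, by simp [pvFirstHit, hp], List.mem_cons_self, hp, ?_⟩
      intro j hj hji
      rcases List.mem_cons.mp hj with rfl | hj
      · omega
      · have := (List.pairwise_cons.mp hl).1 j hj
        omega
    · have heq : pvFirstHit p (i :: r) = pvFirstHit p r := by
        simp [pvFirstHit, hp]
      rw [heq]
      rcases ih (List.pairwise_cons.mp hl).2 with ⟨he, hn⟩ | ⟨i', he, hm, hp', hmin⟩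
      · left
        refine ⟨he, fun j hj => ?_⟩
        rcases List.mem_cons.mp hj with rfl | hj
        · simpa using hp
        · exact hn j hj
      · right
        refine ⟨i', he, List.mem_cons_of_mem _ hm, hp', ?_⟩
        intro j hj hji
        rcases List.mem_cons.mp hj with rfl | hj
        · simpa using hp
        · exact hmin j hj hji

-- B's inner loop (one sweep position i over all titles), seen through get? at one title
lemma pv_inner_get (P : String → Int → Bool) (titles : List String) (i : Int)
    (d : PySem.Dict String Int) (t : String) :
    ((titles.foldl (fun d title => if !d.contains title && P title i then d.insert title i else d) d).get? t)
      = if t ∈ titles ∧ d.contains t = false ∧ P t i = true then some i else d.get? t := by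
  induction titles generalizing d with
  | nil => simp
  | cons s ts ih =>
    simp only [List.foldl_cons]
    by_cases hst : s = t
    · subst hst
      by_cases hc : d.contains s = false
      · by_cases hp : P s i = true
        · rw [if_pos (by simp [hc, hp]), ih]
          simp [PySem.Dict.contains_insert_self, PySem.Dict.get?_insert_self, hc, hp]
        · rw [if_neg (by simp [hc, hp]), ih]
          simp [hc, hp]
      · rw [if_neg (by simp at hc; simp [hc]), ih]
        simp at hc
        simp [hc]
    · have hne : t ≠ s := fun h => hst h.symm
      by_cases hb : (!d.contains s && P s i) = true
      · rw [if_pos hb, ih, PySem.Dict.get?_insert_of_ne d i hne,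
            PySem.Dict.contains_insert]
        simp [hne]
      · rw [if_neg hb, ih]
        simp [hne]

-- B's whole sweep, seen through get? at one title: the first matching position, in sweep order
lemma pv_scan_get (P : String → Int → Bool) (titles : List String) (l : List Int)
    (d : PySem.Dict String Int) (t : String) :
    ((l.foldl (fun d i =>
        titles.foldl (fun d title => if !d.contains title && P title i then d.insert title i else d) d) d).get? t)
      = if t ∈ titles ∧ d.contains t = false then pvFirstHit (P t) l else d.get? t := by
  induction l generalizing d with
  | nil =>
    simp only [List.foldl_nil, pvFirstHit]
    by_cases h : t ∈ titles ∧ d.contains t = false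
    · rw [if_pos h]
      exact (PySem.Dict.get?_eq_none_iff_contains d t).mpr h.2
    · rw [if_neg h]
  | cons i r ih =>
    simp only [List.foldl_cons]
    rw [ih]
    have hstep := pv_inner_get P titles i d t
    have hconstep : (titles.foldl (fun d title => if !d.contains title && P title i then d.insert title i else d) d).contains t
        = if t ∈ titles ∧ d.contains t = false ∧ P t i = true then true else d.contains t := by
      rw [PySem.Dict.contains_eq_isSome_get?, hstep]
      by_cases h : t ∈ titles ∧ d.contains t = false ∧ P t i = true
      · rw [if_pos h, if_pos h]; rfl
      · rw [if_neg h, if_neg h, ← PySem.Dict.contains_eq_isSome_get?]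
    rw [hconstep, hstep]
    by_cases hm : t ∈ titles
    · by_cases hc : d.contains t = false
      · by_cases hp : P t i = true
        · simp [pvFirstHit, hm, hc, hp]
        · simp [pvFirstHit, hm, hc, hp]
      · simp at hc
        simp [hm, hc]
    · simp [hm]

-- the first matching sweep position over range(len+1) IS Python's str.find
lemma pv_firstHit_range (cs t : List Char) :
    pvFirstHit (fun i => pvStartswithFrom cs t i) (PySem.List.pyRange 0 ((cs.length : Int) + 1) 1)
      = (if PySem.Chars.find cs t = -1 then none else some (PySem.Chars.find cs t)) := by
  apply pv_isFirstHit_unique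
  · exact pv_firstHit_isFirstHit _ _ (PySem.List.pairwise_lt_pyRange_one 0 _)
  · by_cases h : PySem.Chars.find cs t = -1
    · rw [if_pos h]
      left
      refine ⟨rfl, fun i hi => ?_⟩
      have hni := (PySem.Chars.find_eq_neg_one_iff cs t).mp h
      by_contra hb
      simp only [Bool.not_eq_false] at hb
      unfold pvStartswithFrom at hb
      have hpre : t <+: cs.drop i.toNat := List.isPrefixOf_iff_prefix.mp hb
      exact hni ((PySem.Chars.isIn_iff_infix t cs).mp
        ((PySem.Chars.exists_prefix_drop_iff_isIn t cs).mp ⟨i.toNat, hpre⟩))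
    · rw [if_neg h]
      right
      have h0 : 0 ≤ PySem.Chars.find cs t := by
        have := PySem.Chars.neg_one_le_find cs t
        omega
      have hlen := PySem.Chars.find_le_length cs t
      obtain ⟨hpre, hmin⟩ := PySem.Chars.find_spec h0
      refine ⟨PySem.Chars.find cs t, rfl, ?_, ?_, ?_⟩
      · rw [PySem.List.mem_pyRange_one]
        omega
      · unfold pvStartswithFrom
        exact List.isPrefixOf_iff_prefix.mpr hpre
      · intro j hj hlt
        rw [PySem.List.mem_pyRange_one] at hj
        by_contra hb
        simp only [Bool.not_eq_false] at hb
        unfold pvStartswithFrom at hb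
        exact hmin j.toNat (by omega) (List.isPrefixOf_iff_prefix.mp hb)


-- once every title has been found B's sweep body is the identity, so the early
-- exit (the break) does not change the dictionary the sweep produces
lemma pv_inner_id (P : String → Int → Bool) (ts : List String) (i : Int)
    (d : PySem.Dict String Int) (h : ∀ t ∈ ts, d.contains t = true) :
    ts.foldl (fun d title => if !d.contains title && P title i then d.insert title i else d) d = d := by
  induction ts with
  | nil => rfl
  | cons s r ih =>
    simp only [List.foldl_cons]
    rw [if_neg (by simp [h s List.mem_cons_self])]
    exact ih (fun t ht => h t (List.mem_cons_of_mem _ ht))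

lemma pv_inner_keys (P : String → Int → Bool) (ts : List String) (i : Int)
    (d : PySem.Dict String Int) :
    ∀ k ∈ (ts.foldl (fun d title => if !d.contains title && P title i then d.insert title i else d) d).keys,
      k ∈ d.keys ∨ k ∈ ts := by
  induction ts generalizing d with
  | nil => simp
  | cons s r ih =>
    intro k hk
    simp only [List.foldl_cons] at hk
    rcases ih _ k hk with h | h
    · by_cases hb : (!d.contains s && P s i) = true
      · rw [if_pos hb] at h
        rcases (PySem.Dict.mem_keys_insert d s k i).mp h with rfl | h
        · exact Or.inr List.mem_cons_self
        · exact Or.inl h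
      · rw [if_neg hb] at h
        exact Or.inl h
    · exact Or.inr (List.mem_cons_of_mem _ h)

lemma pv_inner_nodup (P : String → Int → Bool) (ts : List String) (i : Int)
    (d : PySem.Dict String Int) (h : d.keys.Nodup) :
    (ts.foldl (fun d title => if !d.contains title && P title i then d.insert title i else d) d).keys.Nodup := by
  induction ts generalizing d with
  | nil => exact h
  | cons s r ih =>
    simp only [List.foldl_cons]
    by_cases hb : (!d.contains s && P s i) = true
    · rw [if_pos hb]
      exact ih _ (PySem.Dict.nodup_keys_insert d s i h)
    · rw [if_neg hb]
      exact ih _ h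

lemma pv_guard_eq (P : String → Int → Bool) (titles : List String) (l : List Int) :
    ∀ d : PySem.Dict String Int, d.keys.Nodup → (∀ k ∈ d.keys, k ∈ titles) →
      l.foldl (fun d i =>
          if d.size = (PySem.Set.ofList titles).length then d
          else titles.foldl (fun d title => if !d.contains title && P title i then d.insert title i else d) d) d
        = l.foldl (fun d i =>
            titles.foldl (fun d title => if !d.contains title && P title i then d.insert title i else d) d) d := by
  induction l with
  | nil => intro d _ _; rfl
  | cons i r ih =>
    intro d hn hs
    simp only [List.foldl_cons]
    by_cases hsz : d.size = (PySem.Set.ofList titles).length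
    · rw [if_pos hsz]
      have hsub : d.keys ⊆ PySem.Set.ofList titles := by
        intro k hk
        exact (PySem.Set.mem_ofList titles k).mpr (hs k hk)
      have hlenk : d.keys.length = (PySem.Set.ofList titles).length := by
        have : d.keys.length = d.size := by
          simp [PySem.Dict.keys, PySem.Dict.size]
        omega
      have hperm : d.keys.Perm (PySem.Set.ofList titles) :=
        (List.subperm_of_subset hn hsub).perm_of_length_le (by omega)
      have hall : ∀ t ∈ titles, d.contains t = true := by
        intro t htm
        exact (PySem.Dict.contains_iff_mem_keys d t).mpr
          (hperm.mem_iff.mpr ((PySem.Set.mem_ofList titles t).mpr htm))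
      rw [pv_inner_id P titles i d hall]
      exact ih d hn hs
    · rw [if_neg hsz]
      exact ih _ (pv_inner_nodup P titles i d hn)
        (fun k hk => (pv_inner_keys P titles i d k hk).elim (hs k) id)

set_option maxHeartbeats 1000000 in
theorem pv_main (text : String) (section_titles : List String) :
    extract_sections text section_titles = extract_sections_alt text section_titles := by
  simp only [extract_sections, extract_sections_alt]
  rw [pv_guard_eq (fun title i => pvStartswithFrom text.toList title.toList i) section_titles
    (PySem.List.pyRange 0 (PySem.Str.len text + 1) 1) (PySem.Dict.mk []) (by simp) (by simp)]
  refine congrArg PySem.Dict.items (PySem.List.foldl_congr_mem' _ _ _ _ ?_)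
  intro t ht acc
  have hget := pv_scan_get (fun title i => pvStartswithFrom text.toList title.toList i)
    section_titles (PySem.List.pyRange 0 (PySem.Str.len text + 1) 1) (PySem.Dict.mk []) t
  rw [if_pos ⟨ht, by simp⟩] at hget
  have hlen : PySem.Str.len text = (text.toList.length : Int) := by
    simp [PySem.Str.len_eq]
  rw [hlen] at hget ⊢
  rw [hget, pv_firstHit_range]
  have hfe : PySem.Str.find text t = PySem.Chars.find text.toList t.toList :=
    PySem.Str.find_eq text t
  by_cases h : PySem.Chars.find text.toList t.toList = -1
  · rw [if_pos h]
    rw [if_neg (by rw [hfe, h]; simp)]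
  · rw [if_neg h]
    rw [if_pos (by rw [hfe]; exact h), hfe]

-- ===== VERDICT (by name: the statement is the Claim_ definition above) =====
theorem extract_sections_spec : Claim_equal_extract_sections := by
  intro text section_titles _
  exact pv_main text section_titles
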